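-- pv_equiv track=rewrite | github.com/Daringpark/academic | 2_2_Algorythm/24.02.28/baek/1003.py | zero_one_counts
-- ===== SOURCE A (Python) =====
-- def zero_one_counts(numbers):
--     if numbers >= 2:
--         memo = [[0, 0] for _ in range(numbers+1)]
--         memo[0] = [1, 0]
--         memo[1] = [0, 1]
--         for idx in range(2, numbers+1):
--             memo[idx][0] = memo[idx-2][0] + memo[idx-1][0]
--             memo[idx][1] = memo[idx-2][1] + memo[idx-1][1]
--     if numbers == 1:
--         return f'0 1'
--     elif numbers == 0:
--         return f'1 0'
--     else:
--         return f'{memo[numbers][0]} {memo[numbers][1]}'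
-- ===== SOURCE B (Python) =====
-- def zero_one_counts(numbers):
--     # Fast-doubling Fibonacci: the 0/1 call counts for fib(numbers) are (F(n-1), F(n)).
--     def fib_pair(n):
--         # returns (F(n), F(n+1))
--         if n == 0:
--             return (0, 1)
--         a, b = fib_pair(n >> 1)
--         c = a * (2 * b - a)
--         d = a * a + b * b
--         if n & 1:
--             return (d, c + d)
--         return (c, d)
--     a, b = fib_pair(numbers)
--     return f'{b - a} {a}'
-- ===== Notes on version B (the rewrite author's own statement) =====
-- stated objective: faster
-- what changed: Replaces the O(n)-table dynamic programming (an (n+1)-entry memo filled pair by pair) by fast-doubling Fibonacci recursion: the counts are (F(n-1), F(n)), computed in O(log n) multiplications.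
import Mathlib
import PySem

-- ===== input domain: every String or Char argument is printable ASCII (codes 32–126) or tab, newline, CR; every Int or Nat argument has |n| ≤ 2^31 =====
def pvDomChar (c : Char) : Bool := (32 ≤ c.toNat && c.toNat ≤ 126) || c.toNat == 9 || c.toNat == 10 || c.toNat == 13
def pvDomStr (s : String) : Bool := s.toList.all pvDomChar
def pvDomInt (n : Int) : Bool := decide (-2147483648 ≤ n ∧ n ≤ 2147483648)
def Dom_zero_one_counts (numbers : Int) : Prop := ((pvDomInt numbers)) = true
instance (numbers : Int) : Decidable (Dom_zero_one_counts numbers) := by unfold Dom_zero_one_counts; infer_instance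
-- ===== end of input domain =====

-- B replaces A's O(n) DP table by fast-doubling Fibonacci recursion (O(log n) multiplications).


-- ===== PORT A =====
-- loop body of A's 'for idx in range(2, numbers+1)': memo[idx] = memo[idx-2] + memo[idx-1], componentwise
def zocStep (m : List (Int × Int)) (idx : Int) : List (Int × Int) :=
  PySem.List.pySetD m idx
    ((PySem.List.pyGetD m (idx - 2) (0, 0)).1 + (PySem.List.pyGetD m (idx - 1) (0, 0)).1,
     (PySem.List.pyGetD m (idx - 2) (0, 0)).2 + (PySem.List.pyGetD m (idx - 1) (0, 0)).2)

-- the memo list after 'memo = [[0,0] …]; memo[0] = [1,0]; memo[1] = [0,1]'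
def zocInit (numbers : Int) : List (Int × Int) :=
  PySem.List.pySetD
    (PySem.List.pySetD ((PySem.List.pyRange 0 (numbers + 1) 1).map (fun _ => ((0 : Int), (0 : Int)))) 0 (1, 0))
    1 (0, 1)

def zero_one_counts (numbers : Int) : String :=
  let memo : List (Int × Int) :=
    if numbers ≥ 2 then
      (PySem.List.pyRange 2 (numbers + 1) 1).foldl zocStep (zocInit numbers)
    else []
  if numbers = 1 then "0 1"
  else if numbers = 0 then "1 0"
  else
    PySem.Int.toStr (PySem.List.pyGetD memo numbers (0, 0)).1 ++ " " ++
      PySem.Int.toStr (PySem.List.pyGetD memo numbers (0, 0)).2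

-- ===== PORT B =====
-- fast-doubling: returns (F(n), F(n+1)); Python recurses on n >> 1 of a nonnegative int, ported as Nat recursion
def fibPairAlt (n : Nat) : Int × Int :=
  if n = 0 then (0, 1)
  else
    let p := fibPairAlt (n >>> 1)
    let a := p.1
    let b := p.2
    let c := a * (2 * b - a)
    let d := a * a + b * b
    if n % 2 = 1 then (d, c + d) else (c, d)
termination_by n
decreasing_by simp [Nat.shiftRight_eq_div_pow]; omega

def zero_one_counts_alt (numbers : Int) : String :=
  let p := fibPairAlt numbers.toNat
  PySem.Int.toStr (p.2 - p.1) ++ " " ++ PySem.Int.toStr p.1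

-- ===== PRECONDITION & SPEC =====
-- Pre_ excludes numbers < 0, where A raises UnboundLocalError ('memo' never assigned).
def Pre_zero_one_counts (numbers : Int) : Prop := 0 ≤ numbers
instance (numbers : Int) : Decidable (Pre_zero_one_counts numbers) := by unfold Pre_zero_one_counts; infer_instance
def pvWitness_zero_one_counts : Int := (5)

def Spec_zero_one_counts (numbers : Int) (out : String) : Prop := out = zero_one_counts_alt numbers
instance (numbers : Int) (out : String) : Decidable (Spec_zero_one_counts numbers out) := by unfold Spec_zero_one_counts; infer_instance

-- ===== CLAIM (what is proved, stated in full; the proofs are below) =====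
def Claim_equal_zero_one_counts : Prop := ∀ (numbers : Int), Dom_zero_one_counts numbers → Pre_zero_one_counts numbers → Spec_zero_one_counts numbers (zero_one_counts numbers)

-- ===== LEMMAS AND PROOFS =====

-- B computes consecutive Fibonacci numbers
theorem fibPairAlt_eq (n : Nat) : fibPairAlt n = ((Nat.fib n : Int), (Nat.fib (n + 1) : Int)) := by
  induction n using Nat.strong_induction_on with
  | _ n ih =>
    rw [fibPairAlt]
    by_cases h : n = 0
    · subst h; simp
    · have h2 : n >>> 1 = n / 2 := by simp [Nat.shiftRight_eq_div_pow]
      have hlt : n / 2 < n := by omega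
      simp only [h, if_false, h2, ih (n / 2) hlt]
      set m := n / 2 with hm
      have hle : (Nat.fib m : Int) ≤ 2 * Nat.fib (m + 1) := by
        have := Nat.fib_le_fib_succ (n := m); omega
      by_cases hp : n % 2 = 1
      · have ha : Nat.fib n = Nat.fib (m + 1) ^ 2 + Nat.fib m ^ 2 := by
          rw [show n = 2 * m + 1 by omega]; exact Nat.fib_two_mul_add_one m
        have hb : Nat.fib (n + 1) = Nat.fib (m + 1) * (2 * Nat.fib m + Nat.fib (m + 1)) := by
          rw [show n + 1 = 2 * m + 2 by omega]; exact Nat.fib_two_mul_add_two m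
        simp only [hp, if_true, Prod.mk.injEq]
        exact ⟨by rw [ha]; push_cast; ring, by rw [hb]; push_cast; ring⟩
      · have ha : (Nat.fib n : Int) = Nat.fib m * (2 * Nat.fib (m + 1) - Nat.fib m) := by
          rw [show n = 2 * m by omega, Nat.fib_two_mul, Nat.cast_mul,
            Nat.cast_sub (by exact_mod_cast hle)]
          push_cast
          ring
        have hb : Nat.fib (n + 1) = Nat.fib (m + 1) ^ 2 + Nat.fib m ^ 2 := by
          rw [show n + 1 = 2 * m + 1 by omega]; exact Nat.fib_two_mul_add_one m
        simp only [hp, if_false, Prod.mk.injEq]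
        exact ⟨by rw [ha], by rw [hb]; push_cast; ring⟩

-- the value A's memo holds at index i
def zocVal (i : Nat) : Int × Int := ((Nat.fib (i + 1) : Int) - (Nat.fib i : Int), (Nat.fib i : Int))

theorem zocInit_length (N : Nat) : (zocInit (N : Int)).length = N + 1 := by
  simp [zocInit, PySem.List.pySetD_of_nonneg]

theorem zocInit_getD (N i : Nat) (hN : 2 ≤ N) (hi : i < 2) :
    (zocInit (N : Int)).getD i (0, 0) = zocVal i := by
  have h0 : 0 < N := by omega
  interval_cases i <;>
    simp [zocInit, zocVal, PySem.List.pySetD_of_nonneg, List.getD_eq_getElem?_getD, h0]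

-- loop invariant for A's fold over range(2, k)
theorem zocLoop (N : Nat) (hN : 2 ≤ N) : ∀ k : Nat, 2 ≤ k → k ≤ N + 1 →
    ((PySem.List.pyRange 2 (k : Int) 1).foldl zocStep (zocInit (N : Int))).length = N + 1 ∧
    ∀ i : Nat, i < k →
      ((PySem.List.pyRange 2 (k : Int) 1).foldl zocStep (zocInit (N : Int))).getD i (0, 0) = zocVal i := by
  intro k hk
  induction k, hk using Nat.le_induction with
  | base =>
    intro _
    rw [show ((2 : Nat) : Int) = 2 by norm_num, PySem.List.pyRange_one_eq_nil (by omega)]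
    exact ⟨zocInit_length N, fun i hi => zocInit_getD N i hN hi⟩
  | succ k hk ih =>
    intro hk1
    obtain ⟨ihlen, ihval⟩ := ih (by omega)
    have hrange : PySem.List.pyRange 2 ((k + 1 : Nat) : Int) 1 =
        PySem.List.pyRange 2 (k : Int) 1 ++ [(k : Int)] := by
      push_cast
      exact PySem.List.pyRange_one_succ_right (by exact_mod_cast hk)
    set m := (PySem.List.pyRange 2 (k : Int) 1).foldl zocStep (zocInit (N : Int)) with hm
    have hstep : (PySem.List.pyRange 2 ((k + 1 : Nat) : Int) 1).foldl zocStep (zocInit (N : Int)) =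
        zocStep m (k : Int) := by
      rw [hrange, List.foldl_append]; rfl
    have e2 : ((k : Int) - 2) = ((k - 2 : Nat) : Int) := by omega
    have e1 : ((k : Int) - 1) = ((k - 1 : Nat) : Int) := by omega
    have hset : zocStep m (k : Int) = m.set k
        ((zocVal (k - 2)).1 + (zocVal (k - 1)).1, (zocVal (k - 2)).2 + (zocVal (k - 1)).2) := by
      rw [zocStep, e2, e1, PySem.List.pySetD_natCast, PySem.List.pyGetD_natCast,
        PySem.List.pyGetD_natCast, ihval (k - 2) (by omega), ihval (k - 1) (by omega)]
    have hval : ((zocVal (k - 2)).1 + (zocVal (k - 1)).1, (zocVal (k - 2)).2 + (zocVal (k - 1)).2)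
        = zocVal k := by
      obtain ⟨j, rfl⟩ : ∃ j, k = j + 2 := ⟨k - 2, by omega⟩
      simp only [zocVal, Nat.add_sub_cancel, show j + 2 - 1 = j + 1 by omega, Prod.mk.injEq]
      have g1 : Nat.fib (j + 1 + 1) = Nat.fib j + Nat.fib (j + 1) := by
        rw [show j + 1 + 1 = j + 2 by omega]; exact Nat.fib_add_two
      have g2 : Nat.fib (j + 2 + 1) = Nat.fib (j + 1) + Nat.fib (j + 2) := by
        rw [show j + 2 + 1 = j + 1 + 2 by omega]; exact Nat.fib_add_two
      have g3 : Nat.fib (j + 2) = Nat.fib j + Nat.fib (j + 1) := Nat.fib_add_two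
      refine ⟨?_, ?_⟩ <;> (push_cast [g1, g2, g3]; ring)
    rw [hstep, hset, hval]
    have hklen : k < m.length := by omega
    refine ⟨by simp [ihlen], fun i hi => ?_⟩
    rw [List.getD_eq_getElem?_getD, List.getElem?_set]
    by_cases hik : i = k
    · simp [hik, hklen]
    · have : i < k := by omega
      rw [if_neg fun hkk => hik hkk.symm]
      simpa [List.getD_eq_getElem?_getD] using ihval i this

-- ===== VERDICT (by name: the statement is the Claim_ definition above) =====
set_option maxRecDepth 10000 in
theorem zero_one_counts_spec : Claim_equal_zero_one_counts := by
  intro numbers _ hpre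
  unfold Spec_zero_one_counts
  have h0 : 0 ≤ numbers := hpre
  obtain ⟨N, rfl⟩ : ∃ N : Nat, numbers = (N : Int) := ⟨numbers.toNat, by omega⟩
  by_cases e0 : N = 0
  · subst e0
    rw [zero_one_counts_alt]
    simp only [Nat.cast_zero, Int.toNat_zero, fibPairAlt_eq, Nat.fib_zero]
    decide
  by_cases e1 : N = 1
  · subst e1
    rw [zero_one_counts_alt]
    simp only [Nat.cast_one, Int.toNat_one, fibPairAlt_eq, Nat.fib_one]
    decide
  · have hN : 2 ≤ N := by omega
    have h2 : ((N : Int)) ≥ 2 := by exact_mod_cast hN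
    obtain ⟨hlen, hval⟩ := zocLoop N hN (N + 1) (by omega) (le_refl _)
    rw [zero_one_counts, zero_one_counts_alt]
    simp only [if_pos h2, Int.toNat_natCast, fibPairAlt_eq]
    rw [if_neg (by omega), if_neg (by omega)]
    have hcast : (N : Int) + 1 = ((N + 1 : Nat) : Int) := by push_cast; ring
    rw [hcast]
    rw [PySem.List.pyGetD_natCast]
    rw [hval N (by omega)]
    rfl
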